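-- pv_equiv track=rewrite | github.com/shellym1/dinamic | class4-sumGame.py | hamdaniSumGame
-- ===== SOURCE A (Python) =====
-- def hamdaniSumGame(A):
--     player1 = 0
--     player2 = 0
--     i = 0
--     j = len(A) - 1
--     while i < j:
--         if A[i] >= A[j]:
--             player1 += A[i]
--             i += 1
--         else:
--             player1 += A[j]
--             j -= 1
--         if A[i] >= A[j]:
--             player2 += A[i]
--             i += 1
--         else:
--             player2 += A[j]
--             j -= 1
--     if len(A) % 2 != 0:
--         player1 += A[i]
--
--     if player1 > player2:
--         return ("player1 is the winner! the sum is: ", player1)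
--     elif player1 < player2:
--         return ("player2 is the winner! the sum is: ", player2)
--     else:
--         return("there is a tie! player1 equals to player2! the sum is: ", player1)
-- ===== SOURCE B (Python) =====
-- def hamdaniSumGame(A):
--     picks = []
--     i, j = 0, len(A) - 1
--     while i <= j:
--         if i == j:
--             picks.append(A[i])
--             break
--         if A[i] >= A[j]:
--             picks.append(A[i])
--             i += 1
--         else:
--             picks.append(A[j])
--             j -= 1
--     player1 = 0
--     player2 = 0
--     first = True
--     for v in picks:
--         if first:
--             player1 += v
--         else:
--             player2 += v
--         first = not first
--     if player1 > player2:
--         return ("player1 is the winner! the sum is: ", player1)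
--     elif player1 < player2:
--         return ("player2 is the winner! the sum is: ", player2)
--     else:
--         return ("there is a tie! player1 equals to player2! the sum is: ", player1)
-- ===== Notes on version B (the rewrite author's own statement) =====
-- stated objective: alternative
-- what changed: A interleaves the game into one loop that makes two picks per iteration into two running scores and adds an odd middle element to player1 after the loop; B instead builds the full pick sequence with one pick per step and then splits it into the two players' sums by alternation.
import Mathlib
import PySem

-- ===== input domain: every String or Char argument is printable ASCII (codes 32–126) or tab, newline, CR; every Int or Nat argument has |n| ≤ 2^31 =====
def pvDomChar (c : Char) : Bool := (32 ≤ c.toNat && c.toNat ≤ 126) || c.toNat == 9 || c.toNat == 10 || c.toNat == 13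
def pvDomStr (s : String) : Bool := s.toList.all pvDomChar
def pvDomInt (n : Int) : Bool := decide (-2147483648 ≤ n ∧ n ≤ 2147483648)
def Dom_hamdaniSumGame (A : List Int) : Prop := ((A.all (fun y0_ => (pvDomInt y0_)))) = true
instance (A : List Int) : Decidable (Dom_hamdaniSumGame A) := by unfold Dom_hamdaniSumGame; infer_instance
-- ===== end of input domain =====

-- B (alternative decomposition, same cost): instead of A's interleaved loop that makes two
-- picks per iteration into two running scores plus an unconditional post-loop middle add,
-- B first builds the whole pick sequence with one pick per step and then splits it into the
-- two players' sums by alternation.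

-- ===== PORT A =====
-- A's while loop; the two sequential in-body picks are inlined as nested ifs over the same state.
def hamLoop (A : List Int) (p1 p2 i j : Int) : Int × Int × Int × Int :=
  if h : i < j then
    if PySem.List.pyGetD A i 0 ≥ PySem.List.pyGetD A j 0 then
      if PySem.List.pyGetD A (i+1) 0 ≥ PySem.List.pyGetD A j 0 then
        hamLoop A (p1 + PySem.List.pyGetD A i 0) (p2 + PySem.List.pyGetD A (i+1) 0) (i+2) j
      else
        hamLoop A (p1 + PySem.List.pyGetD A i 0) (p2 + PySem.List.pyGetD A j 0) (i+1) (j-1)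
    else
      if PySem.List.pyGetD A i 0 ≥ PySem.List.pyGetD A (j-1) 0 then
        hamLoop A (p1 + PySem.List.pyGetD A j 0) (p2 + PySem.List.pyGetD A i 0) (i+1) (j-1)
      else
        hamLoop A (p1 + PySem.List.pyGetD A j 0) (p2 + PySem.List.pyGetD A (j-1) 0) i (j-2)
  else (p1, p2, i, j)
termination_by (j - i).toNat
decreasing_by all_goals omega

def hamdaniSumGame (A : List Int) : String × Int :=
  let r := hamLoop A 0 0 0 ((A.length : Int) - 1)
  let p2 := r.2.1
  let p1 := if (A.length : Int) % 2 ≠ 0 then r.1 + PySem.List.pyGetD A r.2.2.1 0 else r.1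
  if p1 > p2 then ("player1 is the winner! the sum is: ", p1)
  else if p1 < p2 then ("player2 is the winner! the sum is: ", p2)
  else ("there is a tie! player1 equals to player2! the sum is: ", p1)

-- ===== PORT B =====
-- B's first while loop: build the pick sequence (Python appends; acc carries the list built so far).
def pickLoop (A : List Int) (i j : Int) (acc : List Int) : List Int :=
  if _h : i ≤ j then
    if i = j then acc ++ [PySem.List.pyGetD A i 0]
    else if PySem.List.pyGetD A i 0 ≥ PySem.List.pyGetD A j 0 then
      pickLoop A (i+1) j (acc ++ [PySem.List.pyGetD A i 0])
    else
      pickLoop A i (j-1) (acc ++ [PySem.List.pyGetD A j 0])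
  else acc
termination_by (j - i).toNat
decreasing_by all_goals omega

-- B's second loop: alternate the picks between the two players.
def splitStep (st : Int × Int × Bool) (v : Int) : Int × Int × Bool :=
  if st.2.2 then (st.1 + v, st.2.1, false) else (st.1, st.2.1 + v, true)

def hamdaniSumGame_alt (A : List Int) : String × Int :=
  let picks := pickLoop A 0 ((A.length : Int) - 1) []
  let s := picks.foldl splitStep (0, 0, true)
  let p1 := s.1
  let p2 := s.2.1
  if p1 > p2 then ("player1 is the winner! the sum is: ", p1)
  else if p1 < p2 then ("player2 is the winner! the sum is: ", p2)
  else ("there is a tie! player1 equals to player2! the sum is: ", p1)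

-- ===== PRECONDITION & SPEC =====
def Spec_hamdaniSumGame (A : List Int) (out : String × Int) : Prop := out = hamdaniSumGame_alt A
instance (A : List Int) (out : String × Int) : Decidable (Spec_hamdaniSumGame A out) := by unfold Spec_hamdaniSumGame; infer_instance

-- ===== CLAIM (what is proved, stated in full; the proofs are below) =====
def Claim_equal_hamdaniSumGame : Prop := ∀ (A : List Int), Dom_hamdaniSumGame A → Spec_hamdaniSumGame A (hamdaniSumGame A)

-- ===== LEMMAS AND PROOFS =====

-- pick sequence built front-to-back, no accumulator (proof helper)
def picksF (A : List Int) (i j : Int) : List Int :=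
  if h : i ≤ j then
    if i = j then [PySem.List.pyGetD A i 0]
    else if PySem.List.pyGetD A i 0 ≥ PySem.List.pyGetD A j 0 then
      PySem.List.pyGetD A i 0 :: picksF A (i+1) j
    else
      PySem.List.pyGetD A j 0 :: picksF A i (j-1)
  else []
termination_by (j - i).toNat
decreasing_by all_goals omega

theorem pickLoop_eq_acc (A : List Int) (i j : Int) (acc : List Int) :
    pickLoop A i j acc = acc ++ picksF A i j := by
  induction i, j using picksF.induct A generalizing acc with
  | case1 j h =>
    rw [pickLoop, picksF]
    simp
  | case2 i j h h2 hc ih =>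
    rw [pickLoop, picksF]
    rw [dif_pos h, dif_pos h, if_neg h2, if_neg h2, if_pos hc, if_pos hc, ih]
    simp
  | case3 i j h h2 hc ih =>
    rw [pickLoop, picksF]
    rw [dif_pos h, dif_pos h, if_neg h2, if_neg h2, if_neg hc, if_neg hc, ih]
    simp
  | case4 i j h =>
    rw [pickLoop, picksF]
    simp [h]

theorem picksF_ge (A : List Int) (i j : Int) (hij : i ≤ j)
    (hc : PySem.List.pyGetD A i 0 ≥ PySem.List.pyGetD A j 0) :
    picksF A i j = PySem.List.pyGetD A i 0 :: picksF A (i+1) j := by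
  rw [picksF]
  by_cases h2 : i = j
  · subst h2
    rw [picksF]
    simp
  · simp [hij, h2, hc]

theorem picksF_lt (A : List Int) (i j : Int) (hij : i ≤ j)
    (hc : ¬ PySem.List.pyGetD A i 0 ≥ PySem.List.pyGetD A j 0) :
    picksF A i j = PySem.List.pyGetD A j 0 :: picksF A i (j-1) := by
  rw [picksF]
  by_cases h2 : i = j
  · exfalso; subst h2; exact hc le_rfl
  · simp [hij, h2, hc]

-- main correspondence between A's interleaved loop and B's pick list
theorem hamLoop_picksF (k : Nat) :
    ∀ (A : List Int) (i j p1 p2 : Int), (j - i + 1).toNat = k →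
      (k % 2 = 0 → ∃ iF jF,
        hamLoop A p1 p2 i j =
          (((picksF A i j).foldl splitStep (p1, p2, true)).1,
           ((picksF A i j).foldl splitStep (p1, p2, true)).2.1, iF, jF)) ∧
      (k % 2 = 1 → ∃ m p1',
        hamLoop A p1 p2 i j = (p1', ((picksF A i j).foldl splitStep (p1, p2, true)).2.1, m, m) ∧
        p1' + PySem.List.pyGetD A m 0 = ((picksF A i j).foldl splitStep (p1, p2, true)).1) := by
  induction k using Nat.strong_induction_on with
  | _ k ih =>
    intro A i j p1 p2 hk
    by_cases hij : i < j
    · -- k ≥ 2, one full loop iteration = two picks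
      have hk2 : k ≥ 2 := by omega
      by_cases c1 : PySem.List.pyGetD A i 0 ≥ PySem.List.pyGetD A j 0
      · have hps : picksF A i j = PySem.List.pyGetD A i 0 :: picksF A (i+1) j :=
          picksF_ge A i j (le_of_lt hij) c1
        by_cases c2 : PySem.List.pyGetD A (i+1) 0 ≥ PySem.List.pyGetD A j 0
        · have hps2 : picksF A (i+1) j = PySem.List.pyGetD A (i+1) 0 :: picksF A (i+1+1) j :=
            picksF_ge A (i+1) j (by omega) c2
          rw [show i+1+1 = i+2 by ring] at hps2
          rw [hamLoop, dif_pos hij, if_pos c1, if_pos c2, hps, hps2]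
          simp only [List.foldl_cons, splitStep, Bool.false_eq_true, if_true, if_false]
          obtain ⟨he, ho⟩ := ih (k-2) (by omega) A (i+2) j
            (p1 + PySem.List.pyGetD A i 0) (p2 + PySem.List.pyGetD A (i+1) 0) (by omega)
          exact ⟨fun hp => he (by omega), fun hp => ho (by omega)⟩
        · have hps2 : picksF A (i+1) j = PySem.List.pyGetD A j 0 :: picksF A (i+1) (j-1) :=
            picksF_lt A (i+1) j (by omega) c2
          rw [hamLoop, dif_pos hij, if_pos c1, if_neg c2, hps, hps2]
          simp only [List.foldl_cons, splitStep, Bool.false_eq_true, if_true, if_false]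
          obtain ⟨he, ho⟩ := ih (k-2) (by omega) A (i+1) (j-1)
            (p1 + PySem.List.pyGetD A i 0) (p2 + PySem.List.pyGetD A j 0) (by omega)
          exact ⟨fun hp => he (by omega), fun hp => ho (by omega)⟩
      · have hps : picksF A i j = PySem.List.pyGetD A j 0 :: picksF A i (j-1) :=
          picksF_lt A i j (le_of_lt hij) c1
        by_cases c2 : PySem.List.pyGetD A i 0 ≥ PySem.List.pyGetD A (j-1) 0
        · have hps2 : picksF A i (j-1) = PySem.List.pyGetD A i 0 :: picksF A (i+1) (j-1) :=
            picksF_ge A i (j-1) (by omega) c2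
          rw [hamLoop, dif_pos hij, if_neg c1, if_pos c2, hps, hps2]
          simp only [List.foldl_cons, splitStep, Bool.false_eq_true, if_true, if_false]
          obtain ⟨he, ho⟩ := ih (k-2) (by omega) A (i+1) (j-1)
            (p1 + PySem.List.pyGetD A j 0) (p2 + PySem.List.pyGetD A i 0) (by omega)
          exact ⟨fun hp => he (by omega), fun hp => ho (by omega)⟩
        · have hps2 : picksF A i (j-1) = PySem.List.pyGetD A (j-1) 0 :: picksF A i (j-1-1) :=
            picksF_lt A i (j-1) (by omega) c2
          rw [show j-1-1 = j-2 by ring] at hps2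
          rw [hamLoop, dif_pos hij, if_neg c1, if_neg c2, hps, hps2]
          simp only [List.foldl_cons, splitStep, Bool.false_eq_true, if_true, if_false]
          obtain ⟨he, ho⟩ := ih (k-2) (by omega) A i (j-2)
            (p1 + PySem.List.pyGetD A j 0) (p2 + PySem.List.pyGetD A (j-1) 0) (by omega)
          exact ⟨fun hp => he (by omega), fun hp => ho (by omega)⟩
    · -- loop does not run: k = 0 or k = 1
      rw [hamLoop, dif_neg hij]
      constructor
      · intro hp
        have hk0 : k = 0 := by omega
        have hji : ¬ i ≤ j := by omega
        rw [picksF, dif_neg hji]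
        exact ⟨i, j, rfl⟩
      · intro hp
        have hk1 : k = 1 := by omega
        have hje : j = i := by omega
        subst hje
        rw [picksF, dif_pos le_rfl, if_pos rfl]
        refine ⟨j, p1, ?_, ?_⟩
        · simp [splitStep]
        · simp [splitStep]

-- ===== VERDICT (by name: the statement is the Claim_ definition above) =====
theorem hamdaniSumGame_spec : Claim_equal_hamdaniSumGame := by
  intro A _
  unfold Spec_hamdaniSumGame hamdaniSumGame hamdaniSumGame_alt
  rw [pickLoop_eq_acc]
  simp only [List.nil_append]
  have h0 : ((A.length : Int) - 1 - 0 + 1).toNat = A.length := by omega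
  obtain ⟨he, ho⟩ := hamLoop_picksF A.length A 0 ((A.length : Int) - 1) 0 0 h0
  by_cases hpar : A.length % 2 = 0
  · obtain ⟨iF, jF, hE⟩ := he hpar
    have hc : ¬ ((A.length : Int) % 2 ≠ 0) := by omega
    rw [hE]
    simp only [hc, if_neg, not_false_iff]
  · obtain ⟨m, p1', hE, hs⟩ := ho (by omega)
    have hc : ((A.length : Int) % 2 ≠ 0) := by omega
    rw [hE]
    rw [if_pos hc, hs]
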